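-- pv_equiv track=rewrite | github.com/eduardohscosta/algoritmos_geneticos | algoritmos_geneticos/monolito_algoritmo_genetico.py | decodificacao_base_dois
-- ===== SOURCE A (Python) =====
-- from typing import Union, List
--
-- def decodificacao_base_dois(matriz: List[str]) -> List[int]:
--     """Decodificacao dos valores binarios do sistema numerico de base 2 para
--     inteiros de base 10 ${a_{ij}}^{n-i}$.
--
--     Parameters
--     ----------
--     matriz : list
--         Lista com os valores binarios para decodificacao.
--
--     Return
--     ----------
--     list
--         uma lista com os valores binarios decodificados para base 10.
--     """
--     base = 2
--     tamanho_matriz = len(matriz)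
--     lista_binarios = [_ for _ in range(tamanho_matriz)]
--     lista_binarios_decodificados = []
--     for id_binario in lista_binarios:
--         valor_binario = int(matriz[id_binario])
--         valor_base_dez = valor_binario * base ** (tamanho_matriz - 1 - id_binario)
--         lista_binarios_decodificados.append(valor_base_dez)
--     return lista_binarios_decodificados
-- ===== SOURCE B (Python) =====
-- def decodificacao_base_dois(matriz):
--     """Same decoding, but with a running weight threaded through a reversed
--     traversal instead of per-element exponentiation."""
--     peso = 1
--     saida = []
--     for valor in reversed(matriz):
--         saida.append(int(valor) * peso)
--         peso *= 2
--     saida.reverse()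
--     return saida
-- ===== Notes on version B (the rewrite author's own statement) =====
-- stated objective: alternative
-- what changed: Replaces the indexed left-to-right loop computing base**(n-1-i) per element with a reversed traversal threading a running weight that doubles each step, reversing the accumulated list at the end.
import Mathlib
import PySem

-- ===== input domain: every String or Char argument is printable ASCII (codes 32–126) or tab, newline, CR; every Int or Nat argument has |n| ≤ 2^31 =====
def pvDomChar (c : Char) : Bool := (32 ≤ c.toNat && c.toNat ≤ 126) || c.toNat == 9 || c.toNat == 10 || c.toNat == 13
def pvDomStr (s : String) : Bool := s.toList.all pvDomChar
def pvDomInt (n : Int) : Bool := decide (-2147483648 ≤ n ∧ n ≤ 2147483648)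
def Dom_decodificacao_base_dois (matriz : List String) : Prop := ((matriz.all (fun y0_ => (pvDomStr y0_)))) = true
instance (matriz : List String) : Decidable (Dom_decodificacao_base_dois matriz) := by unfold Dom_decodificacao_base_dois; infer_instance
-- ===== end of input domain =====

-- B threads a doubling running weight through a reversed traversal instead of
-- computing base**(n-1-i) per element; equivalence on inputs whose strings all parse as ints.


-- ===== PORT A =====
-- int(s); default is never reached inside Pre_ (every string parses)
def pvVal (s : String) : Int := (PySem.Int.ofStr? s).getD 0

def decodificacao_base_dois (matriz : List String) : List Int :=
  let base : Int := 2
  let tamanho : Int := matriz.length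
  let lista_binarios := PySem.List.pyRange 0 tamanho 1
  lista_binarios.foldl
    (fun acc id_binario =>
      let valor_binario := pvVal (PySem.List.pyGetD matriz id_binario "")
      let valor_base_dez := valor_binario * base ^ (tamanho - 1 - id_binario).toNat
      acc ++ [valor_base_dez]) []

-- ===== PORT B =====
def decodificacao_base_dois_alt (matriz : List String) : List Int :=
  let st := matriz.reverse.foldl
    (fun (st : List Int × Int) valor => (st.1 ++ [pvVal valor * st.2], st.2 * 2))
    ([], 1)
  st.1.reverse

-- ===== PRECONDITION & SPEC =====
-- Pre_ excludes exactly the inputs on which int(...) raises ValueError (in both programs):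
-- it admits a list iff every string is a Python int literal — optional surrounding
-- whitespace, an optional single sign, then digits with single underscores between digits.
def pvPyWs (c : Char) : Bool := c == ' ' || c == '\t' || c == '\n' || c == '\r'

def pvDigitTail : List Char → Bool
  | [] => true
  | '_' :: c :: cs => c.isDigit && pvDigitTail cs
  | c :: cs => c.isDigit && pvDigitTail cs

def pvIntBody : List Char → Bool
  | [] => false
  | c :: cs => c.isDigit && pvDigitTail cs

def pvDropSign : List Char → List Char
  | '+' :: cs => cs
  | '-' :: cs => cs
  | cs => cs

def pvIsIntStr (s : String) : Bool :=
  pvIntBody (pvDropSign (((s.toList.dropWhile pvPyWs).reverse.dropWhile pvPyWs).reverse))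

def Pre_decodificacao_base_dois (matriz : List String) : Prop :=
  matriz.all pvIsIntStr = true
instance (matriz : List String) : Decidable (Pre_decodificacao_base_dois matriz) := by
  unfold Pre_decodificacao_base_dois; infer_instance
def pvWitness_decodificacao_base_dois : List String := ["1", "0", " 7 ", "+5", "-12", "007"]

def Spec_decodificacao_base_dois (matriz : List String) (out : List Int) : Prop := out = decodificacao_base_dois_alt matriz
instance (matriz : List String) (out : List Int) : Decidable (Spec_decodificacao_base_dois matriz out) := by unfold Spec_decodificacao_base_dois; infer_instance

-- ===== CLAIM (what is proved, stated in full; the proofs are below) =====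
def Claim_equal_decodificacao_base_dois : Prop := ∀ (matriz : List String), Dom_decodificacao_base_dois matriz → Pre_decodificacao_base_dois matriz → Spec_decodificacao_base_dois matriz (decodificacao_base_dois matriz)

-- ===== LEMMAS AND PROOFS =====
-- reference recursion: most-significant-first decoding
def pvG : List String → List Int
  | [] => []
  | s :: t => pvVal s * 2 ^ t.length :: pvG t

theorem pvG_length_eq (l : List String) :
    (List.range l.length).map (fun k => pvVal (l.getD k "") * 2 ^ (l.length - 1 - k)) = pvG l := by
  induction l with
  | nil => simp [pvG]
  | cons s t ih =>
    rw [List.length_cons, List.range_succ_eq_map, List.map_cons, List.map_map]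
    refine congrArg₂ _ ?_ ?_
    · simp
    · rw [← ih]
      exact List.map_congr_left (fun k hk => by
        simp only [Function.comp]
        congr 2
        omega)

theorem a_eq_g (matriz : List String) : decodificacao_base_dois matriz = pvG matriz := by
  unfold decodificacao_base_dois
  rw [PySem.List.foldl_append_singleton_eq_map, List.nil_append,
      PySem.List.pyRange_one, Int.sub_zero, Int.toNat_natCast, ← pvG_length_eq, List.map_map]
  refine List.map_congr_left (fun k hk => ?_)
  have hk' : k < matriz.length := List.mem_range.mp hk
  simp only [Function.comp, Int.zero_add]
  rw [PySem.List.pyGetD_natCast]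
  congr 2
  omega

theorem b_fold_eq (l : List String) :
    l.reverse.foldl (fun (st : List Int × Int) valor => (st.1 ++ [pvVal valor * st.2], st.2 * 2)) ([], 1)
      = ((pvG l).reverse, 2 ^ l.length) := by
  induction l with
  | nil => simp [pvG]
  | cons s t ih =>
    rw [List.reverse_cons, List.foldl_append, ih]
    simp [pvG, pow_succ, mul_comm]

theorem b_eq_g (matriz : List String) : decodificacao_base_dois_alt matriz = pvG matriz := by
  unfold decodificacao_base_dois_alt
  rw [b_fold_eq]
  simp

-- ===== VERDICT (by name: the statement is the Claim_ definition above) =====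
theorem decodificacao_base_dois_spec : Claim_equal_decodificacao_base_dois := by
  intro matriz _ _
  unfold Spec_decodificacao_base_dois
  rw [a_eq_g, b_eq_g]
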